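-- pv_equiv track=rewrite | github.com/lexoz-bedra/algorithms-ICT | s2/2-1-greedy_DP/2-1-zhadnye-algoritmy-dinamicheskoe-programmirovanie-lexoz-bedra-main/Дополнительные задачи/task15.py | modify_brackets
-- ===== SOURCE A (Python) =====
-- def modify_brackets(seq):
--     n = len(seq)
--     vals = [[0] * n for i in range(n)]
--     pos = [[0] * n for i in range(n)]
--     for right in range(n):
--         for left in range(right, -1, -1):
--             if right == left:
--                 vals[left][right] = 1
--             else:
--                 min_value = 10 ** 9
--                 min_pos = -1
--                 if (seq[left] == '(' and seq[right] == ')') or (seq[left] == '[' and seq[right] == ']') or (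
--                         seq[left] == '{' and seq[right] == '}'):
--                     min_value = vals[left + 1][right - 1]
--                 for k in range(left, right):
--                     if min_value > vals[left][k] + vals[k + 1][right]:
--                         min_value = vals[left][k] + vals[k + 1][right]
--                         min_pos = k
--                 vals[left][right] = min_value
--                 pos[left][right] = min_pos
--     return vals, pos
-- ===== SOURCE B (Python) =====
-- def modify_brackets(seq):
--     """Top-down memoized recursion: solve(l, r) returns (min value, split pos)
--     for the interval [l, r]; the tables are materialized by querying solve per cell."""
--     n = len(seq)
--     memo = {}
--
--     def solve(l, r):
--         if r < l:
--             return (0, 0)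
--         if l == r:
--             return (1, 0)
--         if (l, r) in memo:
--             return memo[(l, r)]
--         if (seq[l] == '(' and seq[r] == ')') or (seq[l] == '[' and seq[r] == ']') or (
--                 seq[l] == '{' and seq[r] == '}'):
--             best = solve(l + 1, r - 1)[0]
--         else:
--             best = 10 ** 9
--         best_pos = -1
--         for k in range(l, r):
--             cost = solve(l, k)[0] + solve(k + 1, r)[0]
--             if cost < best:
--                 best, best_pos = cost, k
--         memo[(l, r)] = (best, best_pos)
--         return (best, best_pos)
--
--     vals = [[solve(l, r)[0] for r in range(n)] for l in range(n)]
--     pos = [[solve(l, r)[1] for r in range(n)] for l in range(n)]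
--     return vals, pos
-- ===== Notes on version B (the rewrite author's own statement) =====
-- stated objective: alternative
-- what changed: B replaces A's bottom-up double-loop table fill with top-down memoized recursion: a recursive solve(l, r) with a dict memo computes each cell on demand, and the two tables are materialized by querying solve per cell.
import Mathlib
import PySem

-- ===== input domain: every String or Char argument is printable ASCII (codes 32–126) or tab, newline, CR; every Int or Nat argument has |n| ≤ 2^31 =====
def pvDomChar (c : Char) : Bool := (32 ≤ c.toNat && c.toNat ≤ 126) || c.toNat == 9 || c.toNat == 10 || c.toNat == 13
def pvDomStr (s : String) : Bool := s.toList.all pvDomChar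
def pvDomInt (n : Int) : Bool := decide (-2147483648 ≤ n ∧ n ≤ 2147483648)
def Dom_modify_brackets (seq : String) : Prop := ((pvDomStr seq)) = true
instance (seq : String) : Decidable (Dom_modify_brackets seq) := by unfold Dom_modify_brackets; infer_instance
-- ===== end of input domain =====

-- B replaces A's bottom-up double-loop table fill with top-down memoized recursion
-- (solve(l,r) with a dict memo, tables materialized by querying solve per cell);
-- alternative decomposition, same asymptotic cost.

-- ===== PORT A =====
-- A reads/writes nested lists with always-in-range indices; ported with getD/set.
def pvGet2 (t : List (List Int)) (i j : Nat) : Int := (t.getD i []).getD j 0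

def pvSet2 (t : List (List Int)) (i j : Nat) (v : Int) : List (List Int) :=
  t.set i ((t.getD i []).set j v)

-- body of A's inner loop (one `left` of column `right`)
def pvStepA (cs : List Char) (right : Nat) (st : List (List Int) × List (List Int))
    (left : Nat) : List (List Int) × List (List Int) :=
  if left = right then (pvSet2 st.1 left right 1, st.2)
  else
    let mv0 : Int :=
      if (cs.getD left ' ' = '(' ∧ cs.getD right ' ' = ')') ∨
         (cs.getD left ' ' = '[' ∧ cs.getD right ' ' = ']') ∨
         (cs.getD left ' ' = '{' ∧ cs.getD right ' ' = '}')
      then pvGet2 st.1 (left + 1) (right - 1) else 10 ^ 9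
    let mp := (List.range' left (right - left)).foldl (fun mp (k : Nat) =>
        if mp.1 > pvGet2 st.1 left k + pvGet2 st.1 (k + 1) right
        then (pvGet2 st.1 left k + pvGet2 st.1 (k + 1) right, (k : Int))
        else mp) (mv0, (-1 : Int))
    (pvSet2 st.1 left right mp.1, pvSet2 st.2 left right mp.2)

-- A's column loop: for left in range(right, -1, -1)  (ported as (range (right+1)).reverse)
def pvColA (cs : List Char) (st : List (List Int) × List (List Int)) (right : Nat) :
    List (List Int) × List (List Int) :=
  ((List.range (right + 1)).reverse).foldl (pvStepA cs right) st

def modify_brackets (seq : String) : List (List Int) × List (List Int) :=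
  let cs := seq.toList
  let n := cs.length
  (List.range n).foldl (pvColA cs)
    (List.replicate n (List.replicate n (0 : Int)), List.replicate n (List.replicate n (0 : Int)))

-- ===== PORT B =====
-- B's recursive solve(l, r): returns the (value, pos) pair and the updated memo dict.
def pvSolveB (cs : List Char) (l r : Nat) (memo : PySem.Dict (Nat × Nat) (Int × Int)) :
    (Int × Int) × PySem.Dict (Nat × Nat) (Int × Int) :=
  if _hrl : r < l then ((0, 0), memo)
  else if _hlr : l = r then ((1, 0), memo)
  else
    match memo.get? (l, r) with
    | some v => (v, memo)
    | none =>
      let bm :=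
        if (cs.getD l ' ' = '(' ∧ cs.getD r ' ' = ')') ∨
           (cs.getD l ' ' = '[' ∧ cs.getD r ' ' = ']') ∨
           (cs.getD l ' ' = '{' ∧ cs.getD r ' ' = '}')
        then let s := pvSolveB cs (l + 1) (r - 1) memo; (s.1.1, s.2)
        else ((10 ^ 9 : Int), memo)
      let res := (List.range' l (r - l)).attach.foldl
        (fun st k =>
          let s1 := pvSolveB cs l k.1 st.2
          let s2 := pvSolveB cs (k.1 + 1) r s1.2
          let c := s1.1.1 + s2.1.1
          if c < st.1.1 then ((c, (k.1 : Int)), s2.2) else (st.1, s2.2))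
        ((bm.1, (-1 : Int)), bm.2)
      (res.1, res.2.insert (l, r) res.1)
termination_by r - l
decreasing_by
  all_goals first
    | omega
    | (have := k.2; rw [List.mem_range'_1] at this; omega)

-- one table cell appended to the current row, threading the memo
def pvRowB (cs : List Char) (proj : Int × Int → Int) (l : Nat)
    (acm : List Int × PySem.Dict (Nat × Nat) (Int × Int)) (r : Nat) :
    List Int × PySem.Dict (Nat × Nat) (Int × Int) :=
  let s := pvSolveB cs l r acm.2
  (acm.1 ++ [proj s.1], s.2)

-- one full table (the nested comprehension), threading the memo
def pvTableB (cs : List Char) (proj : Int × Int → Int)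
    (memo : PySem.Dict (Nat × Nat) (Int × Int)) :
    List (List Int) × PySem.Dict (Nat × Nat) (Int × Int) :=
  (List.range cs.length).foldl (fun acm l =>
    let row := (List.range cs.length).foldl (pvRowB cs proj l) ([], acm.2)
    (acm.1 ++ [row.1], row.2)) ([], memo)

def modify_brackets_alt (seq : String) : List (List Int) × List (List Int) :=
  let cs := seq.toList
  let v := pvTableB cs Prod.fst PySem.Dict.empty
  let p := pvTableB cs Prod.snd v.2
  (v.1, p.1)

-- ===== PRECONDITION & SPEC =====
def Spec_modify_brackets (seq : String) (out : List (List Int) × List (List Int)) : Prop := out = modify_brackets_alt seq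
instance (seq : String) (out : List (List Int) × List (List Int)) : Decidable (Spec_modify_brackets seq out) := by unfold Spec_modify_brackets; infer_instance

-- ===== CLAIM (what is proved, stated in full; the proofs are below) =====
def Claim_equal_modify_brackets : Prop := ∀ (seq : String), Dom_modify_brackets seq → Spec_modify_brackets seq (modify_brackets seq)

-- ===== LEMMAS AND PROOFS =====

-- the pure interval-DP value both programs compute: (min insertions, split position)
def pvDP (cs : List Char) (l r : Nat) : Int × Int :=
  if _h : r ≤ l then (if l = r then (1, 0) else (0, 0))
  else
    let init : Int × Int :=
      (if (cs.getD l ' ' = '(' ∧ cs.getD r ' ' = ')') ∨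
          (cs.getD l ' ' = '[' ∧ cs.getD r ' ' = ']') ∨
          (cs.getD l ' ' = '{' ∧ cs.getD r ' ' = '}')
       then (pvDP cs (l + 1) (r - 1)).1 else 10 ^ 9, -1)
    (List.range' l (r - l)).attach.foldl
      (fun mp k =>
        if mp.1 > (pvDP cs l k.1).1 + (pvDP cs (k.1 + 1) r).1
        then ((pvDP cs l k.1).1 + (pvDP cs (k.1 + 1) r).1, (k.1 : Int))
        else mp) init
termination_by r - l
decreasing_by
  all_goals first
    | omega
    | (have := k.2; rw [List.mem_range'_1] at this; omega)

lemma pvDP_lower (cs : List Char) (l r : Nat) (h : r < l) : pvDP cs l r = (0, 0) := by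
  rw [pvDP.eq_def]; rw [dif_pos (by omega)]; rw [if_neg (by omega)]

lemma pvDP_diag (cs : List Char) (l : Nat) : pvDP cs l l = (1, 0) := by
  rw [pvDP.eq_def]; simp

lemma pvDP_lt (cs : List Char) (l r : Nat) (h : l < r) :
    pvDP cs l r = (List.range' l (r - l)).foldl
      (fun mp (k : Nat) =>
        if mp.1 > (pvDP cs l k).1 + (pvDP cs (k + 1) r).1
        then ((pvDP cs l k).1 + (pvDP cs (k + 1) r).1, (k : Int))
        else mp)
      (if (cs.getD l ' ' = '(' ∧ cs.getD r ' ' = ')') ∨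
          (cs.getD l ' ' = '[' ∧ cs.getD r ' ' = ']') ∨
          (cs.getD l ' ' = '{' ∧ cs.getD r ' ' = '}')
       then (pvDP cs (l + 1) (r - 1)).1 else 10 ^ 9, -1) := by
  rw [pvDP.eq_def]; rw [dif_neg (by omega)]
  conv_rhs => rw [← List.attach_map_subtype_val (List.range' l (r - l)), List.foldl_map]

def pvShape (t : List (List Int)) (n : Nat) : Prop :=
  t.length = n ∧ ∀ row ∈ t, row.length = n

lemma pvShape_row (t : List (List Int)) (n i : Nat) (h : pvShape t n) (hi : i < n) :
    (t.getD i []).length = n := by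
  rw [List.getD_eq_getElem t [] (by have := h.1; omega)]
  exact h.2 _ (List.getElem_mem _)

lemma pvShape_set2 (t : List (List Int)) (n i j : Nat) (v : Int) (h : pvShape t n) :
    pvShape (pvSet2 t i j v) n := by
  by_cases hi : i < n
  · refine ⟨by simpa [pvSet2] using h.1, ?_⟩
    intro row hrow
    rcases List.mem_or_eq_of_mem_set hrow with h1 | h2
    · exact h.2 _ h1
    · subst h2
      rw [List.length_set]
      exact pvShape_row t n i h hi
  · have : pvSet2 t i j v = t := by
      unfold pvSet2
      exact List.set_eq_of_length_le (by have := h.1; omega)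
    rw [this]; exact h

lemma pvGet2_set2 (t : List (List Int)) (n i j a b : Nat) (v : Int)
    (h : pvShape t n) (hi : i < n) (hj : j < n) :
    pvGet2 (pvSet2 t i j v) a b = if a = i ∧ b = j then v else pvGet2 t a b := by
  unfold pvGet2 pvSet2
  rw [List.getD_eq_getElem?_getD (l := t.set i ((t.getD i []).set j v)) (i := a), List.getElem?_set]
  by_cases ha : a = i
  · subst ha
    rw [if_pos rfl, if_pos (by have := h.1; omega)]
    simp only [Option.getD_some]
    rw [List.getD_eq_getElem?_getD (l := (t.getD a []).set j v) (i := b), List.getElem?_set]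
    by_cases hb : b = j
    · subst hb
      rw [if_pos rfl, if_pos (by rw [pvShape_row t n a h hi]; exact hj)]
      simp
    · rw [if_neg (fun hh => hb hh.symm), ← List.getD_eq_getElem?_getD]
      simp [hb]
  · rw [if_neg (fun hh => ha hh.symm), ← List.getD_eq_getElem?_getD]
    simp [ha]

lemma pvGet2_replicate (n a b : Nat) :
    pvGet2 (List.replicate n (List.replicate n (0 : Int))) a b = 0 := by
  unfold pvGet2
  rcases lt_or_ge a n with h1 | h1 <;> rcases lt_or_ge b n with h2 | h2 <;>
    simp [List.getD_eq_getElem?_getD, h1, h2]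

lemma pvShape_replicate (n : Nat) : pvShape (List.replicate n (List.replicate n (0 : Int))) n := by
  constructor
  · simp
  · intro row hrow; simp_all [List.eq_of_mem_replicate hrow]

-- cells already filled by A when column R has been processed down to left-bound Lb
def pvDoneA (R Lb l r : Nat) : Prop := (l ≤ r ∧ r < R) ∨ (Lb ≤ l ∧ l ≤ R ∧ r = R)

def pvInvA (cs : List Char) (R Lb : Nat) (st : List (List Int) × List (List Int)) : Prop :=
  pvShape st.1 cs.length ∧ pvShape st.2 cs.length ∧
  ∀ l r, l < cs.length → r < cs.length →
    (pvDoneA R Lb l r → pvGet2 st.1 l r = (pvDP cs l r).1 ∧ pvGet2 st.2 l r = (pvDP cs l r).2) ∧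
    (¬ pvDoneA R Lb l r → pvGet2 st.1 l r = 0 ∧ pvGet2 st.2 l r = 0)

lemma pvStepA_inv (cs : List Char) (R L : Nat) (st : List (List Int) × List (List Int))
    (hL : L ≤ R) (hR : R < cs.length) (h : pvInvA cs R (L + 1) st) :
    pvInvA cs R L (pvStepA cs R st L) := by
  obtain ⟨hs1, hs2, hinv⟩ := h
  unfold pvStepA
  by_cases hLR : L = R
  · rw [if_pos hLR]
    refine ⟨pvShape_set2 _ _ _ _ _ hs1, hs2, ?_⟩
    intro l r hl hr
    rw [pvGet2_set2 st.1 cs.length L R l r 1 hs1 (by omega) hR]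
    constructor
    · intro hd
      by_cases hcell : l = L ∧ r = R
      · rw [if_pos hcell, hcell.1, hcell.2, hLR, pvDP_diag]
        refine ⟨rfl, ?_⟩
        have h0 := (hinv R R hR hR).2 (by unfold pvDoneA; omega)
        simpa using h0.2
      · rw [if_neg hcell]
        exact (hinv l r hl hr).1 (by unfold pvDoneA at *; omega)
    · intro hd
      have hcell : ¬(l = L ∧ r = R) := by unfold pvDoneA at hd; omega
      rw [if_neg hcell]
      exact (hinv l r hl hr).2 (by unfold pvDoneA at *; omega)
  · rw [if_neg hLR]
    have hLR' : L < R := by omega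
    have hmv0 : ((if (cs.getD L ' ' = '(' ∧ cs.getD R ' ' = ')') ∨
         (cs.getD L ' ' = '[' ∧ cs.getD R ' ' = ']') ∨
         (cs.getD L ' ' = '{' ∧ cs.getD R ' ' = '}')
        then pvGet2 st.1 (L + 1) (R - 1) else 10 ^ 9 : Int), (-1 : Int)) =
        ((if (cs.getD L ' ' = '(' ∧ cs.getD R ' ' = ')') ∨
         (cs.getD L ' ' = '[' ∧ cs.getD R ' ' = ']') ∨
         (cs.getD L ' ' = '{' ∧ cs.getD R ' ' = '}')
        then (pvDP cs (L + 1) (R - 1)).1 else 10 ^ 9 : Int), (-1 : Int)) := by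
      by_cases hc : (cs.getD L ' ' = '(' ∧ cs.getD R ' ' = ')') ∨
         (cs.getD L ' ' = '[' ∧ cs.getD R ' ' = ']') ∨
         (cs.getD L ' ' = '{' ∧ cs.getD R ' ' = '}')
      · rw [if_pos hc, if_pos hc]
        by_cases hlr : L + 1 ≤ R - 1
        · rw [((hinv (L + 1) (R - 1) (by omega) (by omega)).1 (by unfold pvDoneA; omega)).1]
        · rw [((hinv (L + 1) (R - 1) (by omega) (by omega)).2 (by unfold pvDoneA; omega)).1,
              pvDP_lower cs _ _ (by omega)]
      · rw [if_neg hc, if_neg hc]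
    have hfold : (List.range' L (R - L)).foldl (fun mp (k : Nat) =>
          if mp.1 > pvGet2 st.1 L k + pvGet2 st.1 (k + 1) R
          then (pvGet2 st.1 L k + pvGet2 st.1 (k + 1) R, (k : Int))
          else mp)
        ((if (cs.getD L ' ' = '(' ∧ cs.getD R ' ' = ')') ∨
           (cs.getD L ' ' = '[' ∧ cs.getD R ' ' = ']') ∨
           (cs.getD L ' ' = '{' ∧ cs.getD R ' ' = '}')
          then pvGet2 st.1 (L + 1) (R - 1) else 10 ^ 9 : Int), (-1 : Int)) = pvDP cs L R := by
      rw [hmv0, pvDP_lt cs L R hLR']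
      apply PySem.List.foldl_congr_mem
      intro acc k hk
      rw [List.mem_range'_1] at hk
      rw [((hinv L k (by omega) (by omega)).1 (by unfold pvDoneA; omega)).1,
          ((hinv (k + 1) R (by omega) hR).1 (by unfold pvDoneA; omega)).1]
    simp only [hfold]
    refine ⟨pvShape_set2 _ _ _ _ _ hs1, pvShape_set2 _ _ _ _ _ hs2, ?_⟩
    intro l r hl hr
    rw [pvGet2_set2 st.1 cs.length L R l r _ hs1 (by omega) hR,
        pvGet2_set2 st.2 cs.length L R l r _ hs2 (by omega) hR]
    constructor
    · intro hd
      by_cases hcell : l = L ∧ r = R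
      · obtain ⟨h1, h2⟩ := hcell; subst h1; subst h2
        rw [if_pos ⟨rfl, rfl⟩, if_pos ⟨rfl, rfl⟩]
        exact ⟨rfl, rfl⟩
      · rw [if_neg hcell, if_neg hcell]
        exact (hinv l r hl hr).1 (by unfold pvDoneA at *; omega)
    · intro hd
      have hcell : ¬(l = L ∧ r = R) := by unfold pvDoneA at hd; omega
      rw [if_neg hcell, if_neg hcell]
      exact (hinv l r hl hr).2 (by unfold pvDoneA at *; omega)

lemma pvColA_inv (cs : List Char) (R : Nat) (hR : R < cs.length) :
    ∀ m, m ≤ R + 1 → ∀ st, pvInvA cs R m st →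
    pvInvA cs R 0 (((List.range m).reverse).foldl (pvStepA cs R) st) := by
  intro m
  induction m with
  | zero => intro _ st h; simpa using h
  | succ m ih =>
    intro hm st h
    rw [List.range_succ, List.reverse_append, List.reverse_singleton]
    simp only [List.singleton_append, List.foldl_cons]
    exact ih (by omega) _ (pvStepA_inv cs R m st (by omega) hR h)

lemma pvInvA_shift (cs : List Char) (R : Nat) (st : List (List Int) × List (List Int))
    (h : pvInvA cs R 0 st) : pvInvA cs (R + 1) (R + 2) st := by
  refine ⟨h.1, h.2.1, ?_⟩
  intro l r hl hr
  have := h.2.2 l r hl hr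
  constructor
  · intro hd; exact this.1 (by unfold pvDoneA at *; omega)
  · intro hd; exact this.2 (by unfold pvDoneA at *; omega)

lemma pvA_outer (cs : List Char) :
    ∀ m, m ≤ cs.length → pvInvA cs m (m + 1)
      ((List.range m).foldl (pvColA cs)
        (List.replicate cs.length (List.replicate cs.length (0 : Int)),
         List.replicate cs.length (List.replicate cs.length (0 : Int)))) := by
  intro m
  induction m with
  | zero =>
    intro _
    refine ⟨pvShape_replicate _, pvShape_replicate _, ?_⟩
    intro l r hl hr
    constructor
    · intro hd; exact absurd hd (by unfold pvDoneA; omega)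
    · intro _; exact ⟨pvGet2_replicate _ _ _, pvGet2_replicate _ _ _⟩
  | succ m ih =>
    intro hm
    rw [List.range_succ, List.foldl_append, List.foldl_cons, List.foldl_nil]
    exact pvInvA_shift cs m _ (pvColA_inv cs m (by omega) (m + 1) (by omega) _ (ih (by omega)))

-- B-side invariant: every memo entry is the corresponding pvDP value
def pvGoodB (cs : List Char) (m : PySem.Dict (Nat × Nat) (Int × Int)) : Prop :=
  ∀ p v, m.get? p = some v → v = pvDP cs p.1 p.2

lemma pvSolveB_spec (cs : List Char) :
    ∀ d l r memo, r - l ≤ d → pvGoodB cs memo →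
      (pvSolveB cs l r memo).1 = pvDP cs l r ∧ pvGoodB cs (pvSolveB cs l r memo).2 := by
  intro d
  induction d with
  | zero =>
    intro l r memo hd hG
    rw [pvSolveB.eq_def]
    by_cases hrl : r < l
    · rw [dif_pos hrl, pvDP_lower cs l r hrl]; exact ⟨rfl, hG⟩
    · have hlr : l = r := by omega
      rw [dif_neg hrl, dif_pos hlr, hlr, pvDP_diag]; exact ⟨rfl, hG⟩
  | succ d ih =>
    intro l r memo hd hG
    rw [pvSolveB.eq_def]
    by_cases hrl : r < l
    · rw [dif_pos hrl, pvDP_lower cs l r hrl]; exact ⟨rfl, hG⟩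
    by_cases hlr : l = r
    · rw [dif_neg hrl, dif_pos hlr, hlr, pvDP_diag]; exact ⟨rfl, hG⟩
    rw [dif_neg hrl, dif_neg hlr]
    have hlt : l < r := by omega
    cases hget : memo.get? (l, r) with
    | some v =>
      exact ⟨hG _ _ hget, hG⟩
    | none =>
      -- the matched-pair initialization
      have hbm1 : (if (cs.getD l ' ' = '(' ∧ cs.getD r ' ' = ')') ∨
             (cs.getD l ' ' = '[' ∧ cs.getD r ' ' = ']') ∨
             (cs.getD l ' ' = '{' ∧ cs.getD r ' ' = '}')
            then let s := pvSolveB cs (l + 1) (r - 1) memo; (s.1.1, s.2)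
            else ((10 ^ 9 : Int), memo)).1
          = (if (cs.getD l ' ' = '(' ∧ cs.getD r ' ' = ')') ∨
             (cs.getD l ' ' = '[' ∧ cs.getD r ' ' = ']') ∨
             (cs.getD l ' ' = '{' ∧ cs.getD r ' ' = '}')
            then (pvDP cs (l + 1) (r - 1)).1 else (10 ^ 9 : Int)) := by
        by_cases hc : (cs.getD l ' ' = '(' ∧ cs.getD r ' ' = ')') ∨
           (cs.getD l ' ' = '[' ∧ cs.getD r ' ' = ']') ∨
           (cs.getD l ' ' = '{' ∧ cs.getD r ' ' = '}')
        · simp only [if_pos hc]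
          exact congrArg Prod.fst (ih (l + 1) (r - 1) memo (by omega) hG).1
        · simp only [if_neg hc]
      have hbm2 : pvGoodB cs (if (cs.getD l ' ' = '(' ∧ cs.getD r ' ' = ')') ∨
             (cs.getD l ' ' = '[' ∧ cs.getD r ' ' = ']') ∨
             (cs.getD l ' ' = '{' ∧ cs.getD r ' ' = '}')
            then let s := pvSolveB cs (l + 1) (r - 1) memo; (s.1.1, s.2)
            else ((10 ^ 9 : Int), memo)).2 := by
        by_cases hc : (cs.getD l ' ' = '(' ∧ cs.getD r ' ' = ')') ∨
           (cs.getD l ' ' = '[' ∧ cs.getD r ' ' = ']') ∨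
           (cs.getD l ' ' = '{' ∧ cs.getD r ' ' = '}')
        · simp only [if_pos hc]
          exact (ih (l + 1) (r - 1) memo (by omega) hG).2
        · simp only [if_neg hc]
          exact hG
      -- the split-scan fold (over the attached range', rewritten to the plain fold)
      have haux : ∀ ks : List Nat, (∀ k ∈ ks, l ≤ k ∧ k < r) →
          ∀ (bp : Int × Int) m, pvGoodB cs m →
          (ks.foldl (fun st (k : Nat) =>
              let s1 := pvSolveB cs l k st.2
              let s2 := pvSolveB cs (k + 1) r s1.2
              let c := s1.1.1 + s2.1.1
              if c < st.1.1 then ((c, (k : Int)), s2.2) else (st.1, s2.2)) (bp, m)).1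
            = ks.foldl (fun mp (k : Nat) =>
                if mp.1 > (pvDP cs l k).1 + (pvDP cs (k + 1) r).1
                then ((pvDP cs l k).1 + (pvDP cs (k + 1) r).1, (k : Int))
                else mp) bp
          ∧ pvGoodB cs (ks.foldl (fun st (k : Nat) =>
              let s1 := pvSolveB cs l k st.2
              let s2 := pvSolveB cs (k + 1) r s1.2
              let c := s1.1.1 + s2.1.1
              if c < st.1.1 then ((c, (k : Int)), s2.2) else (st.1, s2.2)) (bp, m)).2 := by
        intro ks
        induction ks with
        | nil => intro _ bp m hm; exact ⟨rfl, hm⟩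
        | cons k ks ihk =>
          intro hks bp m hm
          have hk := hks k List.mem_cons_self
          have hs1 := ih l k m (by omega) hm
          have hs2 := ih (k + 1) r _ (by omega) hs1.2
          simp only [List.foldl_cons]
          rw [hs1.1, hs2.1]
          by_cases hcond : (pvDP cs l k).1 + (pvDP cs (k + 1) r).1 < bp.1
          · rw [if_pos hcond, if_pos (by exact hcond)]
            exact ihk (fun x hx => hks x (List.mem_cons_of_mem _ hx)) _ _ hs2.2
          · rw [if_neg hcond, if_neg (by exact hcond)]
            exact ihk (fun x hx => hks x (List.mem_cons_of_mem _ hx)) _ _ hs2.2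
      have hmem : ∀ k ∈ List.range' l (r - l), l ≤ k ∧ k < r := by
        intro k hk; rw [List.mem_range'_1] at hk; omega
      -- the whole "else" body, with the initializer abstracted
      have hfin : ∀ bm : Int × PySem.Dict (Nat × Nat) (Int × Int),
          bm.1 = (if (cs.getD l ' ' = '(' ∧ cs.getD r ' ' = ')') ∨
             (cs.getD l ' ' = '[' ∧ cs.getD r ' ' = ']') ∨
             (cs.getD l ' ' = '{' ∧ cs.getD r ' ' = '}')
            then (pvDP cs (l + 1) (r - 1)).1 else (10 ^ 9 : Int)) →
          pvGoodB cs bm.2 →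
          ((List.range' l (r - l)).attach.foldl
            (fun st k =>
              let s1 := pvSolveB cs l k.1 st.2
              let s2 := pvSolveB cs (k.1 + 1) r s1.2
              let c := s1.1.1 + s2.1.1
              if c < st.1.1 then ((c, (k.1 : Int)), s2.2) else (st.1, s2.2))
            ((bm.1, (-1 : Int)), bm.2)).1 = pvDP cs l r
          ∧ pvGoodB cs (((List.range' l (r - l)).attach.foldl
            (fun st k =>
              let s1 := pvSolveB cs l k.1 st.2
              let s2 := pvSolveB cs (k.1 + 1) r s1.2
              let c := s1.1.1 + s2.1.1
              if c < st.1.1 then ((c, (k.1 : Int)), s2.2) else (st.1, s2.2))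
            ((bm.1, (-1 : Int)), bm.2)).2.insert (l, r)
            ((List.range' l (r - l)).attach.foldl
            (fun st k =>
              let s1 := pvSolveB cs l k.1 st.2
              let s2 := pvSolveB cs (k.1 + 1) r s1.2
              let c := s1.1.1 + s2.1.1
              if c < st.1.1 then ((c, (k.1 : Int)), s2.2) else (st.1, s2.2))
            ((bm.1, (-1 : Int)), bm.2)).1) := by
        intro bm hb1 hb2
        have hconv : (List.range' l (r - l)).attach.foldl
            (fun st k =>
              let s1 := pvSolveB cs l k.1 st.2
              let s2 := pvSolveB cs (k.1 + 1) r s1.2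
              let c := s1.1.1 + s2.1.1
              if c < st.1.1 then ((c, (k.1 : Int)), s2.2) else (st.1, s2.2))
            ((bm.1, (-1 : Int)), bm.2)
          = (List.range' l (r - l)).foldl
            (fun st (k : Nat) =>
              let s1 := pvSolveB cs l k st.2
              let s2 := pvSolveB cs (k + 1) r s1.2
              let c := s1.1.1 + s2.1.1
              if c < st.1.1 then ((c, (k : Int)), s2.2) else (st.1, s2.2))
            ((bm.1, (-1 : Int)), bm.2) := by
          conv_rhs => rw [← List.attach_map_subtype_val (List.range' l (r - l)), List.foldl_map]
        obtain ⟨hf1, hf2⟩ := haux (List.range' l (r - l)) hmem (bm.1, (-1 : Int)) bm.2 hb2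
        have hdp : ((List.range' l (r - l)).foldl
            (fun st (k : Nat) =>
              let s1 := pvSolveB cs l k st.2
              let s2 := pvSolveB cs (k + 1) r s1.2
              let c := s1.1.1 + s2.1.1
              if c < st.1.1 then ((c, (k : Int)), s2.2) else (st.1, s2.2))
            ((bm.1, (-1 : Int)), bm.2)).1 = pvDP cs l r := by
          rw [hf1, hb1, ← pvDP_lt cs l r hlt]
        refine ⟨by rw [hconv]; exact hdp, ?_⟩
        rw [hconv]
        intro p v hgv
        rw [PySem.Dict.get?_insert] at hgv
        by_cases hp : p = (l, r)
        · rw [if_pos hp] at hgv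
          cases hgv
          subst hp
          show _ = pvDP cs l r
          exact hdp
        · rw [if_neg hp] at hgv
          exact hf2 p v hgv
      exact hfin _ hbm1 hbm2

lemma pvGoodB_empty (cs : List Char) :
    pvGoodB cs (PySem.Dict.empty : PySem.Dict (Nat × Nat) (Int × Int)) := by
  intro p v h
  rw [PySem.Dict.get?_empty] at h
  cases h

lemma pvRowB_cells (cs : List Char) (proj : Int × Int → Int) (l : Nat) :
    ∀ rs : List Nat, ∀ (acc : List Int) m, pvGoodB cs m →
      (rs.foldl (pvRowB cs proj l) (acc, m)).1 = acc ++ rs.map (fun r => proj (pvDP cs l r))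
      ∧ pvGoodB cs (rs.foldl (pvRowB cs proj l) (acc, m)).2 := by
  intro rs
  induction rs with
  | nil => intro acc m hm; simpa using hm
  | cons r rs ih =>
    intro acc m hm
    have hs := pvSolveB_spec cs r l r m (by omega) hm
    simp only [List.foldl_cons, pvRowB, hs.1, List.map_cons]
    have := ih (acc ++ [proj (pvDP cs l r)]) _ hs.2
    rw [this.1]
    exact ⟨by simp, this.2⟩

lemma pvTableB_cells (cs : List Char) (proj : Int × Int → Int) :
    ∀ ls : List Nat, ∀ (acc : List (List Int)) m, pvGoodB cs m →
      (ls.foldl (fun acm l =>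
          let row := (List.range cs.length).foldl (pvRowB cs proj l) ([], acm.2)
          (acm.1 ++ [row.1], row.2)) (acc, m)).1
        = acc ++ ls.map (fun l => (List.range cs.length).map (fun r => proj (pvDP cs l r)))
      ∧ pvGoodB cs (ls.foldl (fun acm l =>
          let row := (List.range cs.length).foldl (pvRowB cs proj l) ([], acm.2)
          (acm.1 ++ [row.1], row.2)) (acc, m)).2 := by
  intro ls
  induction ls with
  | nil => intro acc m hm; simpa using hm
  | cons l ls ih =>
    intro acc m hm
    have hrow := pvRowB_cells cs proj l (List.range cs.length) [] m hm
    rw [List.foldl_cons]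
    have hih := ih (acc ++ [((List.range cs.length).foldl (pvRowB cs proj l) ([], m)).1])
      ((List.range cs.length).foldl (pvRowB cs proj l) ([], m)).2 hrow.2
    exact ⟨hih.1.trans (by rw [hrow.1]; simp), hih.2⟩

lemma pvTableB_spec (cs : List Char) (proj : Int × Int → Int)
    (m : PySem.Dict (Nat × Nat) (Int × Int)) (hm : pvGoodB cs m) :
    (pvTableB cs proj m).1
      = (List.range cs.length).map (fun l => (List.range cs.length).map (fun r => proj (pvDP cs l r)))
    ∧ pvGoodB cs (pvTableB cs proj m).2 := by
  have := pvTableB_cells cs proj (List.range cs.length) [] m hm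
  unfold pvTableB
  exact ⟨by rw [this.1]; simp, this.2⟩

-- extraction: a table whose cells are known pointwise IS the canonical map table
lemma pvTable_eq (t : List (List Int)) (n : Nat) (f : Nat → Nat → Int)
    (hs : pvShape t n) (h : ∀ l r, l < n → r < n → pvGet2 t l r = f l r) :
    t = (List.range n).map (fun l => (List.range n).map (fun r => f l r)) := by
  apply List.ext_getElem
  · simp [hs.1]
  intro i h1 h2
  have hi : i < n := by have := hs.1; omega
  have hrow : t[i].length = n := hs.2 _ (List.getElem_mem _)
  rw [List.getElem_map]
  apply List.ext_getElem
  · simp [hrow]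
  intro j h3 h4
  have hj : j < n := by rw [hrow] at h3; exact h3
  rw [List.getElem_map]
  have hh := h i j hi hj
  unfold pvGet2 at hh
  rw [List.getD_eq_getElem t [] (by have := hs.1; omega),
      List.getD_eq_getElem _ 0 (by rw [hrow]; exact hj)] at hh
  rw [hh]
  simp

theorem pvMain (seq : String) : modify_brackets seq = modify_brackets_alt seq := by
  obtain ⟨hsa1, hsa2, hia⟩ := pvA_outer seq.toList seq.toList.length le_rfl
  have h1 : ((List.range seq.toList.length).foldl (pvColA seq.toList)
      (List.replicate seq.toList.length (List.replicate seq.toList.length (0 : Int)),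
       List.replicate seq.toList.length (List.replicate seq.toList.length (0 : Int)))).1 =
      (List.range seq.toList.length).map (fun l =>
        (List.range seq.toList.length).map (fun r => (pvDP seq.toList l r).1)) := by
    apply pvTable_eq _ _ _ hsa1
    intro l r hl hr
    by_cases hle : l ≤ r
    · exact ((hia l r hl hr).1 (Or.inl ⟨hle, hr⟩)).1
    · rw [pvDP_lower seq.toList l r (by omega)]
      exact ((hia l r hl hr).2 (by unfold pvDoneA; omega)).1
  have h2 : ((List.range seq.toList.length).foldl (pvColA seq.toList)
      (List.replicate seq.toList.length (List.replicate seq.toList.length (0 : Int)),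
       List.replicate seq.toList.length (List.replicate seq.toList.length (0 : Int)))).2 =
      (List.range seq.toList.length).map (fun l =>
        (List.range seq.toList.length).map (fun r => (pvDP seq.toList l r).2)) := by
    apply pvTable_eq _ _ _ hsa2
    intro l r hl hr
    by_cases hle : l ≤ r
    · exact ((hia l r hl hr).1 (Or.inl ⟨hle, hr⟩)).2
    · rw [pvDP_lower seq.toList l r (by omega)]
      exact ((hia l r hl hr).2 (by unfold pvDoneA; omega)).2
  have hv := pvTableB_spec seq.toList Prod.fst PySem.Dict.empty (pvGoodB_empty seq.toList)
  have hp := pvTableB_spec seq.toList Prod.snd _ hv.2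
  exact Prod.ext (h1.trans hv.1.symm) (h2.trans hp.1.symm)

-- ===== VERDICT (by name: the statement is the Claim_ definition above) =====
theorem modify_brackets_spec : Claim_equal_modify_brackets := by
  intro seq _
  unfold Spec_modify_brackets
  exact pvMain seq
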